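-- pv_equiv track=rewrite | github.com/FlorianRaediker/BwInf38Runde1 | Aufgabe5/aufgabe5.py | add_left
-- ===== SOURCE A (Python) =====
-- from typing import Iterable, Tuple
--
-- def add_left(shape: Tuple[int, int], array: int):
--     x = 0
--     height = shape[0]
--     width = shape[1]
--     row_with_ones = (2 ** width - 1)
--     for y in range(height):
--         row = (array >> (y * width)) & row_with_ones
--         x |= row << (y * (width + 1))
--     return x
-- ===== SOURCE B (Python) =====
-- def add_left(shape, array):
--     height, width = shape
--     mask = (1 << width) - 1
--     result = 0
--     for y in range(height - 1, -1, -1):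
--         result = (result << (width + 1)) | ((array >> (y * width)) & mask)
--     return result
-- ===== Notes on version B (the rewrite author's own statement) =====
-- stated objective: alternative
-- what changed: B builds the widened grid with a Horner-style running accumulator shifted by (width+1) per row, scanning rows from top (y=height-1) down to 0, instead of A's OR-ing each row into an independently computed absolute offset y*(width+1).
-- outside the precondition, e.g. on add_left((-1, -2), 5): A returns 0, B raises ValueError
import Mathlib
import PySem

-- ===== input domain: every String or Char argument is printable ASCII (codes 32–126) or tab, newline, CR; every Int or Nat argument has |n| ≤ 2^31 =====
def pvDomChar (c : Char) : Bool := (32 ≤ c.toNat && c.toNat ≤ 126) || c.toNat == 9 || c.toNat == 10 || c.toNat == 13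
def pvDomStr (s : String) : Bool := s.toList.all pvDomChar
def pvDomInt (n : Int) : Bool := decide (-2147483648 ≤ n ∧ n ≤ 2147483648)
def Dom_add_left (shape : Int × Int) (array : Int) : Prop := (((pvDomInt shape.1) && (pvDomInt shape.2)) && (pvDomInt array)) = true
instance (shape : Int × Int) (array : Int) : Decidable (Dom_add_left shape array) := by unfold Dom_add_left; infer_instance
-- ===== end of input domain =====

-- B replaces A's absolute-offset OR placement with a Horner-style accumulator over the
-- rows taken in reverse order (objective: alternative decomposition, same cost).
-- Ports use width.toNat as exponent/shift amount: exact for width ≥ 0; for width < 0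
-- (and height > 0) Python raises, which Pre_add_left excludes.

-- ===== PORT A =====
def add_left (shape : Int × Int) (array : Int) : Int :=
  let height := shape.1
  let width := shape.2
  let row_with_ones : Int := 2 ^ width.toNat - 1
  (List.range height.toNat).foldl
    (fun x y =>
      let row : Int := PySem.Int.band (array >>> (y * width.toNat)) row_with_ones
      PySem.Int.bor x (row <<< (y * (width.toNat + 1)))) 0

-- ===== PORT B =====
def add_left_alt (shape : Int × Int) (array : Int) : Int :=
  let height := shape.1
  let width := shape.2
  let mask : Int := (1:Int) <<< width.toNat - 1
  ((List.range height.toNat).reverse).foldl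
    (fun res y =>
      PySem.Int.bor (res <<< (width.toNat + 1))
        (PySem.Int.band (array >>> (y * width.toNat)) mask)) 0

-- ===== PRECONDITION & SPEC =====
-- Pre_ excludes negative width: there Python A raises TypeError (float mask) whenever
-- height > 0, and when height ≤ 0 A returns 0 only because the unused float mask is never
-- touched, while B's integer mask (1 << width) naturally raises ValueError up front.
def Pre_add_left (shape : Int × Int) (array : Int) : Prop := 0 ≤ shape.2
instance (shape : Int × Int) (array : Int) : Decidable (Pre_add_left shape array) := by unfold Pre_add_left; infer_instance
def pvWitness_add_left : (Int × Int) × Int := ((3, 2), 13)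

def Spec_add_left (shape : Int × Int) (array : Int) (out : Int) : Prop := out = add_left_alt shape array
instance (shape : Int × Int) (array : Int) (out : Int) : Decidable (Spec_add_left shape array out) := by unfold Spec_add_left; infer_instance

-- ===== CLAIM (what is proved, stated in full; the proofs are below) =====
def Claim_equal_add_left : Prop := ∀ (shape : Int × Int) (array : Int), Dom_add_left shape array → Pre_add_left shape array → Spec_add_left shape array (add_left shape array)

-- ===== LEMMAS AND PROOFS =====

-- the row value both ports extract
def pvRow (a : Int) (w y : Nat) : Int := PySem.Int.band (a >>> (y * w)) ((2:Int) ^ w - 1)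

-- the common "sum of rows at widened offsets" value
def pvS (a : Int) (w : Nat) : Nat → Int
  | 0 => 0
  | n + 1 => pvS a w n + pvRow a w n * 2 ^ (n * (w + 1))

theorem pvBand_mask_nonneg (a : Int) (w : Nat) :
    0 ≤ PySem.Int.band a ((2:Int) ^ w - 1) := by
  unfold PySem.Int.band
  have h1 : (1:Int) ≤ 2 ^ w := one_le_pow₀ (by norm_num)
  split_ifs <;> first | exact Int.natCast_nonneg _ | omega

theorem pvBand_mask_le (a : Int) (w : Nat) :
    PySem.Int.band a ((2:Int) ^ w - 1) ≤ (2:Int) ^ w - 1 := by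
  unfold PySem.Int.band
  have h2 : (0:Int) ≤ (2:Int) ^ w - 1 := by
    have h1 : (1:Int) ≤ 2 ^ w := one_le_pow₀ (by norm_num)
    omega
  have hm : (((2:Int) ^ w - 1).toNat : Int) = (2:Int) ^ w - 1 := Int.toNat_of_nonneg h2
  split_ifs with h
  · have := Nat.and_le_right (n := a.toNat) (m := ((2:Int) ^ w - 1).toNat)
    calc ((a.toNat &&& ((2:Int) ^ w - 1).toNat : Nat) : Int)
        ≤ ((((2:Int) ^ w - 1).toNat : Nat) : Int) := by exact_mod_cast this
      _ = (2:Int) ^ w - 1 := hm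
  · calc ((((2:Int) ^ w - 1).toNat - (((2:Int) ^ w - 1).toNat &&& (-a - 1).toNat) : Nat) : Int)
        ≤ ((((2:Int) ^ w - 1).toNat : Nat) : Int) := by exact_mod_cast Nat.sub_le _ _
      _ = (2:Int) ^ w - 1 := hm

theorem pvRow_nonneg (a : Int) (w y : Nat) : 0 ≤ pvRow a w y := pvBand_mask_nonneg _ _
theorem pvRow_le (a : Int) (w y : Nat) : pvRow a w y ≤ (2:Int) ^ w - 1 := pvBand_mask_le _ _

theorem pvS_nonneg (a : Int) (w n : Nat) : 0 ≤ pvS a w n := by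
  induction n with
  | zero => simp [pvS]
  | succ n ih =>
    have := pvRow_nonneg a w n
    have : (0:Int) ≤ pvRow a w n * 2 ^ (n * (w + 1)) := by positivity
    simp only [pvS]; omega

theorem pvS_lt (a : Int) (w n : Nat) : pvS a w n < (2:Int) ^ (n * (w + 1)) := by
  induction n with
  | zero => simp [pvS]
  | succ n ih =>
    have hr := pvRow_le a w n
    have hp : (0:Int) < 2 ^ (n * (w + 1)) := by positivity
    have h1 : pvRow a w n * 2 ^ (n * (w + 1)) ≤ ((2:Int) ^ w - 1) * 2 ^ (n * (w + 1)) :=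
      mul_le_mul_of_nonneg_right hr (le_of_lt hp)
    have h2 : (2:Int) ^ ((n + 1) * (w + 1)) = 2 ^ (n * (w + 1)) * 2 ^ w * 2 := by
      have he : (n + 1) * (w + 1) = n * (w + 1) + w + 1 := by ring
      rw [he, pow_succ, pow_add]
    have hw : (1:Int) ≤ 2 ^ w := one_le_pow₀ (by norm_num)
    simp only [pvS]
    nlinarith

-- OR of disjoint nonneg parts is addition
theorem pvBor_disjoint (x r : Int) (k : Nat) (hx0 : 0 ≤ x) (hxk : x < (2:Int) ^ k)
    (hr : 0 ≤ r) : PySem.Int.bor x (r * 2 ^ k) = x + r * 2 ^ k := by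
  have hrk : (0:Int) ≤ r * 2 ^ k := by positivity
  rw [PySem.Int.bor_of_nonneg hx0 hrk]
  have hx : (x.toNat : Int) = x := Int.toNat_of_nonneg hx0
  have hrn : ((r.toNat : Int)) = r := Int.toNat_of_nonneg hr
  have hmul : (r * 2 ^ k).toNat = r.toNat * 2 ^ k := by
    have : r * 2 ^ k = ((r.toNat * 2 ^ k : Nat) : Int) := by push_cast [hrn]; ring
    rw [this, Int.toNat_natCast]
  have hxlt : x.toNat < 2 ^ k := by
    have : (x.toNat : Int) < ((2 ^ k : Nat) : Int) := by push_cast [hx]; exact_mod_cast hxk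
    exact_mod_cast this
  have hkey := Nat.two_pow_add_eq_or_of_lt (a := r.toNat) hxlt
  rw [hmul, Nat.lor_comm, Nat.mul_comm r.toNat (2 ^ k), ← hkey]
  push_cast [hx, hrn]
  ring

theorem pvFoldA (a : Int) (w : Nat) (n : Nat) :
    (List.range n).foldl
      (fun x y => PySem.Int.bor x
        (PySem.Int.band (a >>> (y * w)) ((2:Int) ^ w - 1) <<< (y * (w + 1)))) 0
      = pvS a w n := by
  induction n with
  | zero => simp [pvS]
  | succ n ih =>
    rw [List.range_succ, List.foldl_append, ih]
    simp only [List.foldl_cons, List.foldl_nil, pvS]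
    rw [Int.shiftLeft_eq]
    exact pvBor_disjoint _ _ _ (pvS_nonneg a w n) (pvS_lt a w n) (pvRow_nonneg a w n)

theorem pvFoldB (a : Int) (w : Nat) (n : Nat) (acc : Int) (hacc : 0 ≤ acc) :
    ((List.range n).reverse).foldl
      (fun res y => PySem.Int.bor (res <<< (w + 1))
        (PySem.Int.band (a >>> (y * w)) ((2:Int) ^ w - 1))) acc
      = acc * 2 ^ (n * (w + 1)) + pvS a w n := by
  induction n generalizing acc with
  | zero => simp [pvS]
  | succ n ih =>
    rw [List.range_succ, List.reverse_append]
    simp only [List.reverse_cons, List.reverse_nil, List.nil_append, List.singleton_append,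
      List.foldl_cons]
    have hstep : PySem.Int.bor (acc <<< (w + 1))
        (PySem.Int.band (a >>> (n * w)) ((2:Int) ^ w - 1))
        = pvRow a w n + acc * 2 ^ (w + 1) := by
      rw [Int.shiftLeft_eq, PySem.Int.bor_comm]
      have hlt : pvRow a w n < (2:Int) ^ (w + 1) := by
        have h1 := pvRow_le a w n
        have hw : (2:Int) ^ (w + 1) = 2 ^ w * 2 := pow_succ 2 w
        have : (0:Int) < 2 ^ w := by positivity
        nlinarith
      exact pvBor_disjoint _ _ _ (pvRow_nonneg a w n) hlt hacc
    rw [hstep]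
    have hnn : 0 ≤ pvRow a w n + acc * 2 ^ (w + 1) := by
      have := pvRow_nonneg a w n
      have : (0:Int) ≤ acc * 2 ^ (w + 1) := by positivity
      omega
    rw [ih _ hnn]
    simp only [pvS]
    have : ((n + 1) * (w + 1)) = (w + 1) + n * (w + 1) := by ring
    rw [this, pow_add]
    ring

-- ===== VERDICT (by name: the statement is the Claim_ definition above) =====
theorem add_left_spec : Claim_equal_add_left := by
  intro shape array _hdom _hpre
  unfold Spec_add_left add_left add_left_alt
  simp only []
  have hmask : (1:Int) <<< shape.2.toNat - 1 = (2:Int) ^ shape.2.toNat - 1 := by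
    rw [Int.shiftLeft_eq]; ring
  rw [hmask, pvFoldB array shape.2.toNat shape.1.toNat 0 le_rfl,
      pvFoldA array shape.2.toNat shape.1.toNat]
  ring
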